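-- pv_equiv track=rewrite | github.com/roum02/codingTest | week1.py | solution
-- ===== SOURCE A (Python) =====
-- def solution(price, money, count):
--
--     answer = -1
--     price = int(price)
--     money = int(money)
--     count = int(count)
--
--     if (price >= 1 and price <= 2500) and (money >= 1 and money <= 1000000000) and (count >= 1 and count <= 2500):
--
--         result = []
--         n = 1
--         while n < (count+1):
--             result.append(price * n)
--             n = n + 1
--
--             answer = money - sum(result)
--             if answer > 0:
--                 answer = 0
--             elif answer < 0:
--                 answer = abs(money - sum(result))
--
--     return answer
-- ===== SOURCE B (Python) =====
-- def solution(price, money, count):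
--     price = int(price)
--     money = int(money)
--     count = int(count)
--     if (1 <= price <= 2500) and (1 <= money <= 1000000000) and (1 <= count <= 2500):
--         total = price * count * (count + 1) // 2
--         return max(0, total - money)
--     return -1
-- ===== Notes on version B (the rewrite author's own statement) =====
-- stated objective: faster
-- what changed: Replaced the O(count^2) while-loop that rebuilds and re-sums the running price list each iteration with the closed-form arithmetic-series total price*count*(count+1)//2 and max(0, total-money).
import Mathlib
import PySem

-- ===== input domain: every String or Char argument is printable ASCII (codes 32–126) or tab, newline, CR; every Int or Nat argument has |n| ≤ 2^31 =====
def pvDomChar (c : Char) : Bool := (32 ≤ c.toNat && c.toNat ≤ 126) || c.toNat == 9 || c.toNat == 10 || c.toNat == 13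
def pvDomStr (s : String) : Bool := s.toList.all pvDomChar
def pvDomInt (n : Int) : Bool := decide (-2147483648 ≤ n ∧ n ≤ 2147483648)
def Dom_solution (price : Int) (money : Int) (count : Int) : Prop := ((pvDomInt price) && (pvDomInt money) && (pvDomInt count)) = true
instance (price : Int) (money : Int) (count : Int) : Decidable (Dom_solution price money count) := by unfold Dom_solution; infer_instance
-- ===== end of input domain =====

-- B replaces A's O(count^2) re-summing while-loop with the closed-form series total; objective: faster (asymptotic).


-- ===== PORT A =====
-- the while-loop: n counts up to stop = count+1, result accumulates price*n, answer is recomputed each pass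
def solutionLoop (price money : Int) (stop : Nat) (n : Nat) (result : List Int) (answer : Int) : Int :=
  if n < stop then
    let result' := result ++ [price * (n : Int)]
    let a1 := money - result'.sum
    let answer' := if a1 > 0 then 0 else if a1 < 0 then |money - result'.sum| else a1
    solutionLoop price money stop (n + 1) result' answer'
  else answer
termination_by stop - n

def solution (price : Int) (money : Int) (count : Int) : Int :=
  if (price ≥ 1 ∧ price ≤ 2500) ∧ (money ≥ 1 ∧ money ≤ 1000000000) ∧ (count ≥ 1 ∧ count ≤ 2500) then
    solutionLoop price money (count + 1).toNat 1 [] (-1)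
  else -1

-- ===== PORT B =====
def solution_alt (price : Int) (money : Int) (count : Int) : Int :=
  if (1 ≤ price ∧ price ≤ 2500) ∧ (1 ≤ money ∧ money ≤ 1000000000) ∧ (1 ≤ count ∧ count ≤ 2500) then
    max 0 (PySem.Int.floordiv (price * count * (count + 1)) 2 - money)
  else -1

-- ===== PRECONDITION & SPEC =====
def Spec_solution (price : Int) (money : Int) (count : Int) (out : Int) : Prop := out = solution_alt price money count
instance (price : Int) (money : Int) (count : Int) (out : Int) : Decidable (Spec_solution price money count out) := by unfold Spec_solution; infer_instance

-- ===== CLAIM (what is proved, stated in full; the proofs are below) =====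
def Claim_equal_solution : Prop := ∀ (price : Int) (money : Int) (count : Int), Dom_solution price money count → Spec_solution price money count (solution price money count)

-- ===== LEMMAS AND PROOFS =====

-- sum of the integers n, n+1, …, stop-1 (as an Int)
def rangeSum (n stop : Nat) : Int :=
  if n < stop then (n : Int) + rangeSum (n + 1) stop else 0
termination_by stop - n

theorem rangeSum_closed (stop : Nat) : ∀ n : Nat, n ≤ stop →
    2 * rangeSum n stop = ((stop : Int) - n) * ((stop : Int) + n - 1) := by
  intro n
  induction hn : stop - n generalizing n with
  | zero =>
    intro hle
    have : n = stop := by omega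
    subst this
    rw [rangeSum]; simp
  | succ k ih =>
    intro _
    have hlt : n < stop := by omega
    rw [rangeSum, if_pos hlt]
    have := ih (n + 1) (by omega) (by omega)
    push_cast at this ⊢
    linarith [this]

-- A's per-iteration answer update, as a function of the running sum S
theorem answerForm (money S : Int) :
    (if money - S > 0 then 0 else if money - S < 0 then |money - S| else money - S) =
      max 0 (S - money) := by
  rcases lt_trichotomy (money - S) 0 with h | h | h
  · rw [if_neg (by omega), if_pos h, abs_of_neg h, max_eq_right (by omega)]
    ring
  · rw [if_neg (by omega), if_neg (by omega), h, max_eq_left (by omega)]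
  · rw [if_pos h, max_eq_left (by omega)]

-- the loop's final answer depends only on the total sum of the final result list
theorem solutionLoop_eq (price money : Int) (stop : Nat) :
    ∀ n result answer, n < stop →
    solutionLoop price money stop n result answer =
      max 0 (result.sum + price * rangeSum n stop - money) := by
  intro n
  induction hn : stop - n generalizing n with
  | zero => intro result answer h; omega
  | succ k ih =>
    intro result answer hlt
    rw [solutionLoop, if_pos hlt]
    by_cases hlast : n + 1 < stop
    · rw [ih (n + 1) (by omega) _ _ hlast]
      have hr : rangeSum n stop = (n : Int) + rangeSum (n + 1) stop := by
        rw [rangeSum, if_pos hlt]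
      rw [hr]
      simp only [List.sum_append, List.sum_cons, List.sum_nil, add_zero]
      congr 1
      ring
    · have hstop : stop = n + 1 := by omega
      subst hstop
      rw [solutionLoop, if_neg hlast]
      have hr : rangeSum n (n + 1) = (n : Int) := by
        rw [rangeSum, if_pos (Nat.lt_succ_self n), rangeSum, if_neg (by omega)]
        ring
      rw [hr]
      simp only [List.sum_append, List.sum_cons, List.sum_nil, add_zero]
      rw [answerForm]

-- ===== VERDICT (by name: the statement is the Claim_ definition above) =====
theorem solution_spec : Claim_equal_solution := by
  intro price money count _
  unfold Spec_solution solution solution_alt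
  by_cases hg : (1 ≤ price ∧ price ≤ 2500) ∧ (1 ≤ money ∧ money ≤ 1000000000) ∧ (1 ≤ count ∧ count ≤ 2500)
  · rw [if_pos (by exact ⟨⟨hg.1.1, hg.1.2⟩, hg.2⟩), if_pos hg]
    obtain ⟨⟨hp1, _⟩, _, hc1, _⟩ := hg
    have hstop : ((count + 1).toNat : Int) = count + 1 := by omega
    have hlt : 1 < (count + 1).toNat := by omega
    rw [solutionLoop_eq price money _ 1 [] (-1) hlt]
    have hrs : 2 * rangeSum 1 (count + 1).toNat = count * (count + 1) := by
      rw [rangeSum_closed _ 1 (by omega), hstop]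
      push_cast
      ring
    have hdiv : rangeSum 1 (count + 1).toNat = PySem.Int.floordiv (count * (count + 1)) 2 := by
      rw [PySem.Int.floordiv_eq_ediv_of_pos (by omega), ← hrs]
      omega
    have hmul : PySem.Int.floordiv (price * count * (count + 1)) 2 =
        price * PySem.Int.floordiv (count * (count + 1)) 2 := by
      rw [PySem.Int.floordiv_eq_ediv_of_pos (by omega),
          PySem.Int.floordiv_eq_ediv_of_pos (by omega)]
      rw [mul_assoc]
      exact Int.mul_ediv_assoc price (by omega)
    rw [hdiv, hmul]
    simp
  · rw [if_neg (by tauto), if_neg hg]
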